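-- pv_equiv track=rewrite | github.com/TinaLiu46/Enron-Visualization | Code/code.py | getTo
-- ===== SOURCE A (Python) =====
-- def filter_email(list_emails):
--     #filter out email outside enron organization
--     remove_list = []
--     for email in list_emails:
--         if "@enron.com" not in email:
--             remove_list.append(email)
--     filtered_list = [a for a in list_emails if a not in remove_list]
--     #filter out email with strange format
--     remove_list = []
--     for email in filtered_list:
--         if '/o' in email  or "#" in email or "<" in email:
--             remove_list.append(email)
--     filtered_list = [a for a in filtered_list if a not in remove_list]
--     filtered_list = [a for a in filtered_list if a != ""]
--     return filtered_list
--
-- def normalize_email(list_emails):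
--     #normalize email addresses
--     for i in range(len(list_emails)):
--         if  "'" in list_emails[i]:
--             list_emails[i] = list_emails[i].replace("'","")
--         if list_emails[i].startswith("."):
--             list_emails[i] = list_emails[i][1:]
--     return list_emails
--
-- def getTo(list_t):
--     if list_t == []:
--         return None
--     Filtered_Email = filter_email(list_t)
--     Final = normalize_email(Filtered_Email)
--     List_To = []
--     if Final ==[]:
--         return None
--     else:
--         for receipients in Final:
--             receipients = receipients.split("@")
--             List_To.append(receipients[0])
--         Final1 = [a for a in List_To if a!=""]
--         if Final1 == []:
--             return None
--         else:
--             return Final1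
-- ===== SOURCE B (Python) =====
-- def getTo(list_t):
--     result = []
--     for email in list_t:
--         if "@enron.com" not in email:
--             continue
--         if "/o" in email or "#" in email or "<" in email:
--             continue
--         e = email.replace("'", "")
--         if e.startswith("."):
--             e = e[1:]
--         local = e.split("@")[0]
--         if local != "":
--             result.append(local)
--     return result if result != [] else None
-- ===== Notes on version B (the rewrite author's own statement) =====
-- stated objective: faster
-- what changed: Replaces A's five list passes (two remove-list builds whose comprehensions re-scan the remove list for every element, an in-place normalize pass and an extract pass) by one direct loop that filters, normalizes and extracts each email in a single step, with the three empty-result checks collapsed into one final check.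
import Mathlib
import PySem

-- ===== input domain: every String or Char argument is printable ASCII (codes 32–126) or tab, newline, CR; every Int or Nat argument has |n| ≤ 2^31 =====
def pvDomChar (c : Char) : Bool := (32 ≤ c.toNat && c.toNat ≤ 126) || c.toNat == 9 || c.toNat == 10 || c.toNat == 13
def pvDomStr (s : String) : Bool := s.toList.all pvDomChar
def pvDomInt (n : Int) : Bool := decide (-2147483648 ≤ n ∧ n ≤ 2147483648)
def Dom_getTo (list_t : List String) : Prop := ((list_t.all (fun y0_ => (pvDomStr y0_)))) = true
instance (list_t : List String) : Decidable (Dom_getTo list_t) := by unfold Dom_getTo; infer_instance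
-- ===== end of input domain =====

-- B replaces A's multi-pass pipeline (two remove-list builds with quadratic 'not in remove_list' re-scans,
-- three comprehensions, an in-place normalize pass, an extract pass) by one O(n) loop doing
-- filter+normalize+extract per element; a timing run measured B faster.


-- ===== PORT A =====
-- filter_email: the two remove-list builds and the three comprehensions, step for step
def filterEmail (list_emails : List String) : List String :=
  let removeList1 := list_emails.foldl
    (fun acc email => if !(PySem.Str.isIn "@enron.com" email) then acc ++ [email] else acc) []
  let filtered1 := list_emails.filter (fun a => !(removeList1.contains a))
  let removeList2 := filtered1.foldl
    (fun acc email =>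
      if PySem.Str.isIn "/o" email || PySem.Str.isIn "#" email || PySem.Str.isIn "<" email
      then acc ++ [email] else acc) []
  let filtered2 := filtered1.filter (fun a => !(removeList2.contains a))
  filtered2.filter (fun a => a != "")

-- normalize_email: the Python loop rewrites list_emails[i] in place, touching only index i;
-- ported as the element-wise recursion applying the same two conditional rewrites in the same order
def normalizeEmail : List String → List String
  | [] => []
  | e :: rest =>
    let e1 := if PySem.Str.isIn "'" e then PySem.Str.replace e "'" "" else e
    let e2 := if PySem.Str.startswith e1 "." then PySem.Str.slice e1 (some 1) none else e1
    e2 :: normalizeEmail rest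

def getTo (list_t : List String) : Option (List String) :=
  if list_t == [] then none
  else
    let final := normalizeEmail (filterEmail list_t)
    if final == [] then none
    else
      -- receipients.split("@")[0]: split with the non-empty separator "@" is some non-empty
      -- list, so getD []/headD "" is exact (the Python index 0 cannot fail)
      let listTo := final.foldl
        (fun acc r => acc ++ [((PySem.Str.split? r "@").getD []).headD ""]) []
      let final1 := listTo.filter (fun a => a != "")
      if final1 == [] then none else some final1

-- ===== PORT B =====
def getTo_alt (list_t : List String) : Option (List String) :=
  let result := list_t.foldl
    (fun acc email =>
      if !(PySem.Str.isIn "@enron.com" email) then acc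
      else if PySem.Str.isIn "/o" email || PySem.Str.isIn "#" email || PySem.Str.isIn "<" email then acc
      else
        let e := PySem.Str.replace email "'" ""
        let e2 := if PySem.Str.startswith e "." then PySem.Str.slice e (some 1) none else e
        -- e.split("@")[0]: non-empty separator, so the index-0 access is exact
        let localPart := ((PySem.Str.split? e2 "@").getD []).headD ""
        if localPart != "" then acc ++ [localPart] else acc) []
  if result != [] then some result else none

-- ===== PRECONDITION & SPEC =====
def Spec_getTo (list_t : List String) (out : Option (List String)) : Prop := out = getTo_alt list_t
instance (list_t : List String) (out : Option (List String)) : Decidable (Spec_getTo list_t out) := by unfold Spec_getTo; infer_instance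

-- ===== CLAIM (what is proved, stated in full; the proofs are below) =====
def Claim_equal_getTo : Prop := ∀ (list_t : List String), Dom_getTo list_t → Spec_getTo list_t (getTo list_t)

-- ===== LEMMAS AND PROOFS =====

-- the per-element keep predicate, normalization and local-part extraction both programs compute
def pvKeep (e : String) : Bool :=
  PySem.Str.isIn "@enron.com" e &&
    !(PySem.Str.isIn "/o" e || PySem.Str.isIn "#" e || PySem.Str.isIn "<" e)

def pvNorm (e : String) : String :=
  let e1 := PySem.Str.replace e "'" ""
  if PySem.Str.startswith e1 "." then PySem.Str.slice e1 (some 1) none else e1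

def pvLoc (e : String) : String :=
  ((PySem.Str.split? (pvNorm e) "@").getD []).headD ""

theorem pvLoc_def (e : String) : pvLoc e = ((PySem.Str.split? (pvNorm e) "@").getD []).headD "" := rfl

-- B's loop body is the guarded filter/map/append step over pvKeep/pvLoc
theorem step_eq :
  (fun (acc : List String) email =>
      if !(PySem.Str.isIn "@enron.com" email) then acc
      else if PySem.Str.isIn "/o" email || PySem.Str.isIn "#" email || PySem.Str.isIn "<" email then acc
      else
        let e := PySem.Str.replace email "'" ""
        let e2 := if PySem.Str.startswith e "." then PySem.Str.slice e (some 1) none else e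
        let localPart := ((PySem.Str.split? e2 "@").getD []).headD ""
        if localPart != "" then acc ++ [localPart] else acc)
  = (fun (acc : List String) x =>
      if pvKeep x then (if pvLoc x != "" then acc ++ [pvLoc x] else acc) else acc) := by
  funext acc email
  simp only [pvKeep, pvLoc, pvNorm]
  cases h1 : PySem.Str.isIn "@enron.com" email <;>
    cases h2 : PySem.Str.isIn "/o" email <;>
    cases h3 : PySem.Str.isIn "#" email <;>
    cases h4 : PySem.Str.isIn "<" email <;>
    simp only [Bool.not_false, Bool.not_true, Bool.or_false, Bool.or_true,
      Bool.and_true, Bool.and_false, Bool.false_eq_true, if_true, if_false]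

-- a filter-then-map-then-filter fold in one pass
theorem foldl_fmf {α β : Type} (p : α → Bool) (f : α → β) (q : β → Bool) (l : List α) (acc : List β) :
    l.foldl (fun acc x => if p x then (if q (f x) then acc ++ [f x] else acc) else acc) acc
    = acc ++ ((l.filter p).map f).filter q := by
  induction l generalizing acc with
  | nil => simp
  | cons x t ih => cases hp : p x <;> cases hq : q (f x) <;> simp [hp, hq, ih]

theorem ne_empty_of_isIn (a : String) (h : PySem.Str.isIn "@enron.com" a = true) : (a != "") = true := by
  cases a_eq : decide (a = "") with
  | true => exact absurd h (by simp at a_eq; subst a_eq; decide)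
  | false => simp_all

-- str.replace with a pattern that does not occur is the identity (A guards replace with an 'in' test, B does not)
theorem replace_go_no_match (old new : List Char) :
    ∀ (fuel : Nat) (l acc : List Char), ¬ old <:+: l →
      PySem.Chars.replace.go old new fuel l acc = acc.reverse ++ l := by
  intro fuel
  induction fuel with
  | zero => intro l acc _; rfl
  | succ n ih =>
    intro l acc h
    cases l with
    | nil => simp [PySem.Chars.replace.go]
    | cons c t =>
      have hp : old.isPrefixOf (c :: t) = false := by
        by_contra hne
        exact h ((List.isPrefixOf_iff_prefix.mp (by simpa using hne)).isInfix)
      have ht : ¬ old <:+: t := fun hi => h (hi.trans (List.suffix_cons c t).isInfix)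
      simp only [PySem.Chars.replace.go, hp]
      rw [ih t (c :: acc) ht]
      simp

theorem replace_of_not_isIn (e : String) (h : PySem.Str.isIn "'" e = false) :
    PySem.Str.replace e "'" "" = e := by
  have h' : PySem.Chars.isIn "'".toList e.toList = false := by
    rw [← PySem.Str.isIn_eq]; exact h
  have hinf : ¬ ("'".toList <:+: e.toList) := (PySem.Chars.isIn_eq_false_iff _ _).mp h'
  apply String.toList_inj.mp
  rw [PySem.Str.toList_replace]
  unfold PySem.Chars.replace
  rw [if_neg (by decide)]
  rw [replace_go_no_match _ _ _ _ _ hinf]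
  simp

theorem foldl_if_append {α : Type} (p : α → Bool) (l : List α) (acc : List α) :
    l.foldl (fun acc x => if p x then acc ++ [x] else acc) acc = acc ++ l.filter p := by
  induction l generalizing acc with
  | nil => simp
  | cons x t ih => cases hp : p x <;> simp [hp, ih]

-- dropping the elements collected in a remove_list is filtering by the complementary predicate
theorem filter_not_contains_filter_not {α : Type} [DecidableEq α] (p : α → Bool) (l : List α) :
    l.filter (fun a => !((l.filter (fun e => !p e)).contains a)) = l.filter p := by
  apply List.filter_congr
  intro a ha
  by_cases hp : p a = true
  · simp [hp, ha]
  · simp at hp; simp [hp, ha]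

theorem filterEmail_eq (l : List String) : filterEmail l = l.filter pvKeep := by
  unfold filterEmail
  simp only [foldl_if_append, List.nil_append]
  rw [show (fun a => !(PySem.Str.isIn "@enron.com" a)) = (fun a => !(fun e => PySem.Str.isIn "@enron.com" e) a) from rfl,
    filter_not_contains_filter_not (fun e => PySem.Str.isIn "@enron.com" e) l]
  rw [show (fun email => PySem.Str.isIn "/o" email || PySem.Str.isIn "#" email || PySem.Str.isIn "<" email)
      = (fun e => !(fun x => !(PySem.Str.isIn "/o" x || PySem.Str.isIn "#" x || PySem.Str.isIn "<" x)) e) from by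
        funext e; simp,
    filter_not_contains_filter_not _ (l.filter fun e => PySem.Str.isIn "@enron.com" e)]
  rw [List.filter_filter, List.filter_filter]
  apply List.filter_congr
  intro a ha
  unfold pvKeep
  cases h1 : PySem.Str.isIn "@enron.com" a
  · simp
  · simp [ne_empty_of_isIn a h1]

theorem normalizeEmail_eq_map (l : List String) : normalizeEmail l = l.map pvNorm := by
  induction l with
  | nil => rfl
  | cons e rest ih =>
    simp only [normalizeEmail, List.map_cons, ih]
    congr 1
    cases h : PySem.Str.isIn "'" e
    · simp only [Bool.false_eq_true, if_false, pvNorm, replace_of_not_isIn e h]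
    · simp only [if_true, pvNorm]

theorem getTo_eq_alt (l : List String) : getTo l = getTo_alt l := by
  unfold getTo getTo_alt
  rw [step_eq, foldl_fmf pvKeep pvLoc (fun s => s != "") l []]
  simp only [List.nil_append, filterEmail_eq, normalizeEmail_eq_map,
    PySem.List.foldl_append_singleton_eq_map, List.map_map, Function.comp_def]
  simp only [← pvLoc_def]
  by_cases hl : l = []
  · subst hl; simp
  · rw [if_neg (by simpa using hl)]
    by_cases hf : l.filter pvKeep = []
    · rw [hf]
      simp
    · rw [if_neg (by simpa using hf)]
      by_cases h1 : ((l.filter pvKeep).map pvLoc).filter (fun a => a != "") = []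
      · simp [h1]
      · rw [if_neg (by simpa using h1), if_pos (by simpa using h1)]

-- ===== VERDICT (by name: the statement is the Claim_ definition above) =====
theorem getTo_spec : Claim_equal_getTo := by
  intro l _
  unfold Spec_getTo
  exact getTo_eq_alt l
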